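-- pv_equiv track=rewrite | github.com/Rudra-J/Exp | tree_list.py | level_inf
-- ===== SOURCE A (Python) =====
-- def level_inf(level:int)->list:
--     """ input level number, will return start index and no. of elements for the level"""
--     if level == 1: return [0,0]
--     st_ind=0
--     lvl=1
--     n=1
--     while lvl <level:
--         st_ind=(st_ind*2)+1
--         n*=2
--         lvl+=1
--     return [st_ind,n]
-- ===== SOURCE B (Python) =====
-- def level_inf(level: int) -> list:
--     """ input level number, will return start index and no. of elements for the level"""
--     if level == 1:
--         return [0, 0]
--     n = 1 << max(level - 1, 0)
--     return [n - 1, n]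
-- ===== Notes on version B (the rewrite author's own statement) =====
-- stated objective: faster
-- what changed: Replaces the doubling while-loop with the closed form n = 2^(level-1) (clamped at 0 for level < 1), returning [n-1, n], keeping the level==1 special case.
import Mathlib
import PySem

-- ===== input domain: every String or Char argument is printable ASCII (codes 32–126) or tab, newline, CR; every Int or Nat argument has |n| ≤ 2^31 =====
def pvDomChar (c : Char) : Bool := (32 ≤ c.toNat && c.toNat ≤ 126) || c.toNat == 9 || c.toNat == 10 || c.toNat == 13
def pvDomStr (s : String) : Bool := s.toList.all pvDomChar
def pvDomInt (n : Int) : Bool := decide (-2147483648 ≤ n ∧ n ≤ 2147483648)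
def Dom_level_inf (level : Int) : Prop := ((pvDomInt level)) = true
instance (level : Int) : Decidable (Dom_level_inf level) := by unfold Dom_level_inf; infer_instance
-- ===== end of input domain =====

-- B replaces A's doubling loop by the closed form 2^(level-1) (clamped at 0): faster (O(1) vs O(level)).


-- ===== PORT A =====
-- the while-loop of A, state (st_ind, n, lvl); terminates since (level - lvl).toNat decreases
def levelLoop (st n lvl level : Int) : Int × Int :=
  if h : lvl < level then
    levelLoop (st * 2 + 1) (n * 2) (lvl + 1) level
  else
    (st, n)
termination_by (level - lvl).toNat
decreasing_by omega

def level_inf (level : Int) : List Int :=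
  if level == 1 then [0, 0]
  else
    let r := levelLoop 0 1 1 level
    [r.1, r.2]

-- ===== PORT B =====
def level_inf_alt (level : Int) : List Int :=
  if level == 1 then [0, 0]
  else
    let n : Int := 2 ^ (max (level - 1) 0).toNat   -- 1 << max(level-1, 0)
    [n - 1, n]

-- ===== PRECONDITION & SPEC =====
def Spec_level_inf (level : Int) (out : List Int) : Prop := out = level_inf_alt level
instance (level : Int) (out : List Int) : Decidable (Spec_level_inf level out) := by unfold Spec_level_inf; infer_instance

-- ===== CLAIM (what is proved, stated in full; the proofs are below) =====
def Claim_equal_level_inf : Prop := ∀ (level : Int), Dom_level_inf level → Spec_level_inf level (level_inf level)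

-- ===== LEMMAS AND PROOFS =====

theorem levelLoop_closed (d : Nat) : ∀ (st n lvl level : Int), (level - lvl).toNat = d →
    levelLoop st n lvl level = ((st + 1) * 2 ^ d - 1, n * 2 ^ d) := by
  induction d with
  | zero =>
    intro st n lvl level hd
    rw [levelLoop]
    have : ¬ lvl < level := by omega
    simp [this]
  | succ k ih =>
    intro st n lvl level hd
    rw [levelLoop]
    have h : lvl < level := by omega
    simp only [h, dif_pos]
    rw [ih _ _ _ _ (by omega)]
    rw [Prod.mk.injEq]; constructor <;> ring

-- ===== VERDICT (by name: the statement is the Claim_ definition above) =====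
theorem level_inf_spec : Claim_equal_level_inf := by
  intro level _
  unfold Spec_level_inf level_inf level_inf_alt
  by_cases h1 : level = 1
  · simp [h1]
  · have h1' : (level == 1) = false := by simp [h1]
    simp only [h1', Bool.false_eq_true, if_false]
    rw [levelLoop_closed ((level - 1).toNat) 0 1 1 level rfl]
    have : (max (level - 1) 0).toNat = (level - 1).toNat := by omega
    simp [this]
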